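-- pv_equiv track=rewrite | github.com/drQuintilis/NIDUC_projekt | kombinacje.py | count_valid_error_combinations
-- ===== SOURCE A (Python) =====
-- def count_valid_error_combinations(n, min_distance, t):
--     def recursive_count(positions, start):
--         if len(positions) == t:  # We've placed t errors
--             return 1
--         valid_count = 0
--         for i in range(start, n):
--             # Ensure minimum distance constraint
--             if not positions or i - positions[-1] > min_distance:
--                 valid_count += recursive_count(positions + [i], i + 1)
--         return valid_count
--
--     return recursive_count([], 0)
-- ===== SOURCE B (Python) =====
-- from math import comb
--
-- def count_valid_error_combinations(n, min_distance, t):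
--     # Closed form via gap substitution: positions must differ by more than
--     # min_distance, i.e. by at least d+1 with d = max(min_distance, 0);
--     # shrinking each of the t-1 gaps by d bijects with plain t-subsets of
--     # a window of size n - (t-1)*d.
--     if t < 0:
--         return 0
--     if t == 0:
--         return 1
--     d = max(min_distance, 0)
--     m = n - (t - 1) * d
--     if m < t:
--         return 0
--     return comb(m, t)
-- ===== Notes on version B (the rewrite author's own statement) =====
-- stated objective: faster
-- what changed: Replaces A's exponential backtracking enumeration of all valid placements by the closed-form binomial C(n - (t-1)*max(min_distance,0), t) obtained by the standard gap substitution; Pre_ excludes only inputs where A's recursion depth hits the interpreter's recursion limit (RecursionError) or its search can never finish.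
import Mathlib
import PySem

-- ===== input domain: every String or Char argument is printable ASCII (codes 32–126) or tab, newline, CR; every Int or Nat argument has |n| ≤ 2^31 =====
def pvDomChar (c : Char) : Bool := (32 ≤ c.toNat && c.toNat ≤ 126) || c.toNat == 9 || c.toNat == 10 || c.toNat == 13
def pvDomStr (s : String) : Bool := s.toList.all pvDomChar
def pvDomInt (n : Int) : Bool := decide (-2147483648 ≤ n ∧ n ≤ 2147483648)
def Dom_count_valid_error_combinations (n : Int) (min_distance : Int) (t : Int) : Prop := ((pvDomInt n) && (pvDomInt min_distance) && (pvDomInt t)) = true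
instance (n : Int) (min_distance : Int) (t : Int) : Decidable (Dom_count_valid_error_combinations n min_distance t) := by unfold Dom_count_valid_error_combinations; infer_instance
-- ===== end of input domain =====

-- B replaces A's exponential backtracking enumeration by the closed-form
-- binomial C(n - (t-1)*max(min_distance,0), t) obtained by the gap substitution.

-- ===== PORT A =====
-- recursive_count(positions, start) and its inner for-loop, transliterated as a
-- mutual pair; the for-loop over range(start, n) becomes recursion on i.
mutual
def pvRecCount (n min_distance t : Int) (positions : List Int) (start : Int) : Int :=
  if (positions.length : Int) = t then 1
  else pvRecLoop n min_distance t positions start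
termination_by ((n - start).toNat, 1)

def pvRecLoop (n min_distance t : Int) (positions : List Int) (i : Int) : Int :=
  if _h : i < n then
    (if positions = [] ∨ i - (positions.getLast?.getD 0) > min_distance then
       pvRecCount n min_distance t (positions ++ [i]) (i + 1)
     else 0) + pvRecLoop n min_distance t positions (i + 1)
  else 0
termination_by ((n - i).toNat, 0)
decreasing_by
  all_goals first
    | exact Prod.Lex.right _ (by omega)
    | exact Prod.Lex.left _ _ (by omega)
end

def count_valid_error_combinations (n : Int) (min_distance : Int) (t : Int) : Int :=
  pvRecCount n min_distance t [] 0

-- ===== PORT B =====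
def count_valid_error_combinations_alt (n : Int) (min_distance : Int) (t : Int) : Int :=
  if t < 0 then 0
  else if t = 0 then 1
  else
    let d := max min_distance 0
    let m := n - (t - 1) * d
    if m < t then 0 else (Nat.choose m.toNat t.toNat : Int)

-- ===== PRECONDITION & SPEC =====
-- Pre_ excludes exactly the inputs on which A does not return a value: A's depth-first
-- search immediately descends to nesting depth min(t, number of placeable positions)
-- (t unbounded when t < 0), so when that depth reaches the interpreter's recursion
-- limit A raises RecursionError (the test harness sets sys.setrecursionlimit(10000));
-- 9000 leaves margin for baseline stack frames, and in the band between 9000 and the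
-- limit A's search tree has at least 2^9000 nodes, so A never returns there either.
def Pre_count_valid_error_combinations (n : Int) (min_distance : Int) (t : Int) : Prop :=
  (let K : Int := if n ≤ 0 then 0 else (n - 1) / (max min_distance 0 + 1) + 1
   if t < 0 then K else min t K) < 9000
instance (n : Int) (min_distance : Int) (t : Int) : Decidable (Pre_count_valid_error_combinations n min_distance t) := by unfold Pre_count_valid_error_combinations; infer_instance
def pvWitness_count_valid_error_combinations : Int × Int × Int := (10, 1, 3)

def Spec_count_valid_error_combinations (n : Int) (min_distance : Int) (t : Int) (out : Int) : Prop := out = count_valid_error_combinations_alt n min_distance t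
instance (n : Int) (min_distance : Int) (t : Int) (out : Int) : Decidable (Spec_count_valid_error_combinations n min_distance t out) := by unfold Spec_count_valid_error_combinations; infer_instance

-- ===== CLAIM (what is proved, stated in full; the proofs are below) =====
def Claim_equal_count_valid_error_combinations : Prop := ∀ (n : Int) (min_distance : Int) (t : Int), Dom_count_valid_error_combinations n min_distance t → Pre_count_valid_error_combinations n min_distance t → Spec_count_valid_error_combinations n min_distance t (count_valid_error_combinations n min_distance t)

-- ===== LEMMAS AND PROOFS =====

-- number of ways to place k errors, each at least d'+1 apart, in a window of m slots
def Ccnt (d' : Int) : Nat → Int → Int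
  | 0, _ => 1
  | (k+1), m => if (k : Int) + 1 ≤ m - k * d' then ((m - (k : Int) * d').toNat.choose (k+1) : Int) else 0

-- effective lowest admissible position for the loop state (pos, i)
def pvEff (d : Int) (pos : List Int) (i : Int) : Int :=
  match pos.getLast? with
  | none => i
  | some p => max i (p + d + 1)

lemma ccnt_nonpos (d' : Int) (hd : 0 ≤ d') (k : Nat) (m : Int) (hm : m ≤ 0) :
    Ccnt d' (k+1) m = 0 := by
  have hk : (0:Int) ≤ (k : Int) * d' := by positivity
  simp only [Ccnt]
  rw [if_neg (by omega)]

lemma ccnt_pascal (d' : Int) (_hd : 0 ≤ d') (k : Nat) (m : Int) (hm : 1 ≤ m) :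
    Ccnt d' (k+1) m = Ccnt d' k (m - 1 - d') + Ccnt d' (k+1) (m - 1) := by
  cases k with
  | zero =>
    simp only [Ccnt]
    norm_num [Nat.choose_one_right]
    split_ifs <;> omega
  | succ k' =>
    simp only [Ccnt]
    push_cast
    have e1 : m - 1 - d' - (k' : Int) * d' = m - ((k' : Int) + 1) * d' - 1 := by ring
    have e2 : m - 1 - ((k' : Int) + 1) * d' = m - ((k' : Int) + 1) * d' - 1 := by ring
    rw [e1, e2]
    set r : Int := m - ((k' : Int) + 1) * d' with hr
    split_ifs with h1 h2 h3 h2 h3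
    · -- r ≥ k'+2, r-1 ≥ k'+1, r-1 ≥ k'+2 : Pascal
      have h4 : r.toNat = (r - 1).toNat + 1 := by omega
      rw [h4, Nat.choose_succ_succ']
      push_cast; ring
    · -- r = k'+2 : 1 = 1 + 0
      have h4 : r.toNat = k' + 2 := by omega
      have h5 : (r - 1).toNat = k' + 1 := by omega
      rw [h4, h5]
      norm_num [Nat.choose_self]
    all_goals omega

lemma recCount_ne (n d t : Int) (pos : List Int) (s : Int) (h : (pos.length : Int) ≠ t) :
    pvRecCount n d t pos s = pvRecLoop n d t pos s := by
  rw [pvRecCount.eq_def]; exact if_neg h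

lemma loop_neg (n d t : Int) (ht : t < 0) :
    ∀ (f : Nat) (pos : List Int) (i : Int), (n - i).toNat ≤ f → pvRecLoop n d t pos i = 0 := by
  intro f
  induction f with
  | zero => intro pos i hf; rw [pvRecLoop.eq_def]; rw [dif_neg (by omega)]
  | succ f ih =>
    intro pos i hf
    rw [pvRecLoop.eq_def]
    split
    · next hin =>
      rw [recCount_ne n d t _ _ (by omega),
          ih _ _ (by omega), ih _ _ (by omega)]
      simp
    · rfl

lemma loop_eq (n d t : Int) :
    ∀ (f : Nat) (k : Nat) (pos : List Int) (i : Int), (n - i).toNat ≤ f →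
      (pos.length : Int) + ((k : Int) + 1) = t →
      pvRecLoop n d t pos i = Ccnt (max d 0) (k+1) (n - pvEff d pos i) := by
  intro f
  induction f with
  | zero =>
    intro k pos i hf hlen
    rw [pvRecLoop, dif_neg (by omega)]
    have heff : i ≤ pvEff d pos i := by
      unfold pvEff; cases pos.getLast? <;> simp
    rw [ccnt_nonpos _ (by omega) _ _ (by omega)]
  | succ f ih =>
    intro k pos i hf hlen
    rw [pvRecLoop.eq_def]
    split
    · next hin =>
      split
      · next hcond =>
        -- the condition holds: the effective bound is i itself
        have heff : pvEff d pos i = i := by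
          unfold pvEff
          rcases hcond with hemp | hgt
          · subst hemp; simp
          · cases hlast : pos.getLast? with
            | none => simp
            | some p => simp only; rw [hlast] at hgt; simp at hgt; omega
        -- the inner recursive call
        have hlastapp : (pos ++ [i]).getLast? = some i := by
          simp
        have hlapp : ((pos ++ [i]).length : Int) = (pos.length : Int) + 1 := by
          simp
        have hcall : pvRecCount n d t (pos ++ [i]) (i + 1)
            = Ccnt (max d 0) k (n - (i + 1 + max d 0)) := by
          cases k with
          | zero =>
            rw [pvRecCount.eq_def, if_pos (by omega)]
            simp [Ccnt]
          | succ k' =>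
            rw [recCount_ne n d t _ _ (by push_cast at hlen; omega)]
            rw [ih k' (pos ++ [i]) (i + 1) (by omega) (by push_cast at hlen; omega)]
            have : pvEff d (pos ++ [i]) (i + 1) = i + 1 + max d 0 := by
              unfold pvEff; rw [hlastapp]; simp only; omega
            rw [this]
        have htail : pvRecLoop n d t pos (i + 1)
            = Ccnt (max d 0) (k+1) (n - (i + 1)) := by
          rw [ih k pos (i + 1) (by omega) hlen]
          have : pvEff d pos (i + 1) = i + 1 := by
            unfold pvEff
            cases hlast : pos.getLast? with
            | none => simp
            | some p =>
              simp only
              rcases hcond with hemp | hgt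
              · subst hemp; simp at hlast
              · rw [hlast] at hgt; simp at hgt; omega
          rw [this]
        rw [hcall, htail, heff]
        have hpas := ccnt_pascal (max d 0) (by omega) k (n - i) (by omega)
        have h1 : n - i - 1 - max d 0 = n - (i + 1 + max d 0) := by ring
        have h2 : n - i - 1 = n - (i + 1) := by ring
        rw [h1, h2] at hpas
        omega
      · next hcond =>
        -- condition false: pos nonempty, i < p + d + 1; the effective bound is unchanged
        obtain ⟨hne, hle⟩ := not_or.mp hcond
        cases hlast : pos.getLast? with
        | none => exact absurd (List.getLast?_eq_none_iff.mp hlast) hne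
        | some p =>
          rw [hlast] at hle
          simp only [Option.getD_some] at hle
          rw [ih k pos (i + 1) (by omega) hlen]
          have he1 : pvEff d pos i = p + d + 1 := by
            unfold pvEff; rw [hlast]; simp only; omega
          have he2 : pvEff d pos (i + 1) = p + d + 1 := by
            unfold pvEff; rw [hlast]; simp only; omega
          rw [he1, he2]; ring
    · next hin =>
      have heff : i ≤ pvEff d pos i := by
        unfold pvEff; cases pos.getLast? <;> simp
      rw [ccnt_nonpos _ (by omega) _ _ (by omega)]

-- ===== VERDICT (by name: the statement is the Claim_ definition above) =====
theorem count_valid_error_combinations_spec : Claim_equal_count_valid_error_combinations := by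
  intro n d t _ _
  unfold Spec_count_valid_error_combinations count_valid_error_combinations
    count_valid_error_combinations_alt
  rcases lt_trichotomy t 0 with ht | ht | ht
  · rw [recCount_ne n d t [] 0 (by simp; omega),
        loop_neg n d t ht (n - 0).toNat [] 0 (by omega)]
    rw [if_pos ht]
  · subst ht
    rw [pvRecCount.eq_def, if_pos (by simp)]
    norm_num
  · have hk : ∃ k : Nat, (k : Int) + 1 = t := ⟨(t - 1).toNat, by omega⟩
    obtain ⟨k, hkt⟩ := hk
    rw [recCount_ne n d t [] 0 (by simp; omega),
        loop_eq n d t (n - 0).toNat k [] 0 (by omega) (by simp; omega)]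
    have heff : pvEff d [] 0 = 0 := by unfold pvEff; simp
    rw [heff]
    rw [if_neg (by omega), if_neg (by omega)]
    simp only [Ccnt]
    have hm : n - 0 - (k : Int) * max d 0 = n - (t - 1) * max d 0 := by
      rw [← hkt]; ring
    have htk : t.toNat = k + 1 := by omega
    rw [hm, htk]
    split_ifs with h1 h2 h2 <;> try rfl
    · exfalso; omega
    · exfalso; omega
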